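-- pv_equiv track=rewrite | github.com/Vaan5/piecewisecrf | piecewisecrf/datasets/helpers/pairwise_label_generator.py | get_number_of_all_neigbhours_surrounding
-- ===== SOURCE A (Python) =====
-- def get_number_of_all_neigbhours_surrounding(h, w, nsize):
--     '''
--
--     Returns total number of neighbours for the surrounding neighbourhood
--
--     Returns
--     -------
--     ret_val: int
--         Total number of neighbours
--
--
--     '''
--     ret_val = 0
--     nsize_half = int(nsize / 2)
--     for i in range(int(h)):
--         for j in range(int(w)):
--             for n_i in range(i - nsize_half, i + nsize_half + 1):
--                 for n_j in range(j - nsize_half, j + nsize_half + 1):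
--                     if n_i < 0 or n_i >= h or n_j < 0 or n_j >= w or (n_i == i and n_j == j):
--                         continue
--                     ret_val += 1
--     return ret_val
-- ===== SOURCE B (Python) =====
-- def get_number_of_all_neigbhours_surrounding(h, w, nsize):
--     ret_val = 0
--     nsize_half = int(nsize / 2)
--     for di in range(max(-nsize_half, 1 - h), min(nsize_half, h - 1) + 1):
--         for dj in range(max(-nsize_half, 1 - w), min(nsize_half, w - 1) + 1):
--             if di == 0 and dj == 0:
--                 continue
--             ret_val += (h - abs(di)) * (w - abs(dj))
--     return ret_val
-- ===== Notes on version B (the rewrite author's own statement) =====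
-- stated objective: faster
-- what changed: Instead of scanning every pixel's whole neighbourhood window, B sums over the (2k+1)^2 offsets only, clamped to offsets that keep a pixel in bounds, counting for each offset (di,dj)!=(0,0) the in-bounds pixel pairs via the closed form (h-|di|)*(w-|dj|).
import Mathlib
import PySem

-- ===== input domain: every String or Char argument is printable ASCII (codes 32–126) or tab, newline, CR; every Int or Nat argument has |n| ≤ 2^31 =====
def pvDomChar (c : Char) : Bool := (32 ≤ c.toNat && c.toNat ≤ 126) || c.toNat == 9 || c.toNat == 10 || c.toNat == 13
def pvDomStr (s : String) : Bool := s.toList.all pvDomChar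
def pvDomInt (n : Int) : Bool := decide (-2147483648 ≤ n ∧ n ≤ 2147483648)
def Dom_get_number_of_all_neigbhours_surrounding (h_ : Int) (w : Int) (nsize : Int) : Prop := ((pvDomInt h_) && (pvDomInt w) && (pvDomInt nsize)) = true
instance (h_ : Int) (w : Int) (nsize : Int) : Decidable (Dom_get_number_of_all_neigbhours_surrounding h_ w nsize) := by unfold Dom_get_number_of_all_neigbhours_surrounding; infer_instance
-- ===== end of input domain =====

-- B replaces A's O(h*w*nsize^2) scan of every pixel's neighbourhood by an O(nsize^2) sum over
-- offsets of max(0,h-|di|)*max(0,w-|dj|); objective: faster (asymptotic).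

-- ===== PORT A =====
def get_number_of_all_neigbhours_surrounding (h_ : Int) (w : Int) (nsize : Int) : Int :=
  let nsize_half := PySem.Int.truncdiv nsize 2   -- int(nsize / 2): trunc toward zero, exact on |nsize| ≤ 2^31
  (PySem.List.pyRange 0 h_).foldl (fun acc i =>
    (PySem.List.pyRange 0 w).foldl (fun acc j =>
      (PySem.List.pyRange (i - nsize_half) (i + nsize_half + 1)).foldl (fun acc n_i =>
        (PySem.List.pyRange (j - nsize_half) (j + nsize_half + 1)).foldl (fun acc n_j =>
          if n_i < 0 ∨ n_i ≥ h_ ∨ n_j < 0 ∨ n_j ≥ w ∨ (n_i = i ∧ n_j = j) then acc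
          else acc + 1) acc) acc) acc) 0

-- ===== PORT B =====
def get_number_of_all_neigbhours_surrounding_alt (h_ : Int) (w : Int) (nsize : Int) : Int :=
  let nsize_half := PySem.Int.truncdiv nsize 2
  (PySem.List.pyRange (max (-nsize_half) (1 - h_)) (min nsize_half (h_ - 1) + 1)).foldl (fun acc di =>
    (PySem.List.pyRange (max (-nsize_half) (1 - w)) (min nsize_half (w - 1) + 1)).foldl (fun acc dj =>
      if di = 0 ∧ dj = 0 then acc
      else acc + (h_ - |di|) * (w - |dj|)) acc) 0

-- ===== PRECONDITION & SPEC =====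
def Spec_get_number_of_all_neigbhours_surrounding (h_ : Int) (w : Int) (nsize : Int) (out : Int) : Prop := out = get_number_of_all_neigbhours_surrounding_alt h_ w nsize
instance (h_ : Int) (w : Int) (nsize : Int) (out : Int) : Decidable (Spec_get_number_of_all_neigbhours_surrounding h_ w nsize out) := by unfold Spec_get_number_of_all_neigbhours_surrounding; infer_instance

-- ===== CLAIM (what is proved, stated in full; the proofs are below) =====
def Claim_equal_get_number_of_all_neigbhours_surrounding : Prop := ∀ (h_ : Int) (w : Int) (nsize : Int), Dom_get_number_of_all_neigbhours_surrounding h_ w nsize → Spec_get_number_of_all_neigbhours_surrounding h_ w nsize (get_number_of_all_neigbhours_surrounding h_ w nsize)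

-- ===== LEMMAS AND PROOFS =====

theorem sum_pyRange (f : ℤ → ℤ) (a b : ℤ) :
    ((PySem.List.pyRange a b).map f).sum = ∑ x ∈ Finset.Ico a b, f x := by
  rcases (by omega : b ≤ a ∨ a < b) with hle | hlt
  · rw [PySem.List.pyRange_one_eq_nil hle, Finset.Ico_eq_empty (by omega)]; simp
  · induction hn : (b - a).toNat generalizing a with
    | zero => omega
    | succ m ih =>
      have hins : Finset.Ico a b = insert a (Finset.Ico (a+1) b) := by
        ext x; simp only [Finset.mem_Ico, Finset.mem_insert]; omega
      rw [PySem.List.pyRange_one_cons hlt, hins, Finset.sum_insert (by simp)]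
      simp only [List.map_cons, List.sum_cons]
      rcases (by omega : b ≤ a + 1 ∨ a + 1 < b) with h2 | h2
      · rw [PySem.List.pyRange_one_eq_nil h2, Finset.Ico_eq_empty (by omega)]; simp
      · rw [ih (a+1) h2 (by omega)]

theorem foldl_if_skip {α : Type} (p : α → Prop) [DecidablePred p] (g : α → ℤ) (l : List α) (a : ℤ) :
    l.foldl (fun acc x => if p x then acc else acc + g x) a
      = a + (l.map (fun x => if p x then 0 else g x)).sum := by
  induction l generalizing a with
  | nil => simp
  | cons x xs ih => simp only [List.foldl_cons, List.map_cons, List.sum_cons, ih]; split_ifs <;> ring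

theorem cnt_lemma (h d : ℤ) :
    (∑ i ∈ Finset.Ico (0:ℤ) h, if 0 ≤ i + d ∧ i + d < h then (1:ℤ) else 0) = max 0 (h - |d|) := by
  rw [Finset.sum_boole]
  have hf : ({x ∈ Finset.Ico (0:ℤ) h | 0 ≤ x + d ∧ x + d < h}) = Finset.Ico (max 0 (-d)) (min h (h - d)) := by
    ext x; simp only [Finset.mem_filter, Finset.mem_Ico]; omega
  rw [hf, Int.card_Ico]
  rcases abs_cases d with ⟨h1, _⟩ | ⟨h1, _⟩ <;> rw [h1] <;> omega

theorem sum_Ico_shift (c a b : ℤ) (f : ℤ → ℤ) :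
    (∑ x ∈ Finset.Ico (c + a) (c + b), f x) = ∑ d ∈ Finset.Ico a b, f (c + d) := by
  rw [← Finset.map_add_left_Ico, Finset.sum_map]; rfl

theorem sum4_factor (s t : Finset ℤ) (S T : ℤ → Finset ℤ) (f g : ℤ → ℤ → ℤ) :
    (∑ i ∈ s, ∑ j ∈ t, ∑ ni ∈ S i, ∑ nj ∈ T j, f i ni * g j nj)
      = (∑ i ∈ s, ∑ ni ∈ S i, f i ni) * (∑ j ∈ t, ∑ nj ∈ T j, g j nj) := by
  calc (∑ i ∈ s, ∑ j ∈ t, ∑ ni ∈ S i, ∑ nj ∈ T j, f i ni * g j nj)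
      = ∑ i ∈ s, ∑ j ∈ t, (∑ ni ∈ S i, f i ni) * (∑ nj ∈ T j, g j nj) :=
        Finset.sum_congr rfl fun i _ => Finset.sum_congr rfl fun j _ => (Finset.sum_mul_sum _ _ _ _).symm
    _ = _ := (Finset.sum_mul_sum _ _ _ _).symm

theorem A_eq (h w nsize : ℤ) :
    get_number_of_all_neigbhours_surrounding h w nsize
      = ∑ i ∈ Finset.Ico (0:ℤ) h, ∑ j ∈ Finset.Ico (0:ℤ) w,
        ∑ ni ∈ Finset.Ico (i - PySem.Int.truncdiv nsize 2) (i + PySem.Int.truncdiv nsize 2 + 1),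
        ∑ nj ∈ Finset.Ico (j - PySem.Int.truncdiv nsize 2) (j + PySem.Int.truncdiv nsize 2 + 1),
        (if ni < 0 ∨ ni ≥ h ∨ nj < 0 ∨ nj ≥ w ∨ (ni = i ∧ nj = j) then (0:ℤ) else 1) := by
  unfold get_number_of_all_neigbhours_surrounding
  simp only [foldl_if_skip, PySem.List.foldl_add, zero_add, sum_pyRange]

theorem B_eq (h w nsize : ℤ) :
    get_number_of_all_neigbhours_surrounding_alt h w nsize
      = ∑ di ∈ Finset.Ico (max (-(PySem.Int.truncdiv nsize 2)) (1 - h)) (min (PySem.Int.truncdiv nsize 2) (h - 1) + 1),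
        ∑ dj ∈ Finset.Ico (max (-(PySem.Int.truncdiv nsize 2)) (1 - w)) (min (PySem.Int.truncdiv nsize 2) (w - 1) + 1),
        (if di = 0 ∧ dj = 0 then (0:ℤ) else (h - |di|) * (w - |dj|)) := by
  unfold get_number_of_all_neigbhours_surrounding_alt
  simp only [foldl_if_skip, PySem.List.foldl_add, zero_add, sum_pyRange]

-- the clamped offset sums of B equal the full-window offset sums with the max-clamped weights
theorem B_unclamp (h w k : ℤ) :
    (∑ di ∈ Finset.Ico (max (-k) (1 - h)) (min k (h - 1) + 1),
       ∑ dj ∈ Finset.Ico (max (-k) (1 - w)) (min k (w - 1) + 1),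
       (if di = 0 ∧ dj = 0 then (0:ℤ) else (h - |di|) * (w - |dj|)))
    = ∑ di ∈ Finset.Ico (-k) (k + 1), ∑ dj ∈ Finset.Ico (-k) (k + 1),
       (if di = 0 ∧ dj = 0 then (0:ℤ) else max 0 (h - |di|) * max 0 (w - |dj|)) := by
  have habs : ∀ x lo hi : ℤ, x ∈ Finset.Ico (max (-k) lo) (min k hi + 1) →
      max (-k) lo ≤ x ∧ x ≤ min k hi := by
    intro x lo hi hx; simp only [Finset.mem_Ico] at hx; omega
  have hzero : ∀ c x : ℤ, x ∈ Finset.Ico (-k) (k+1) →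
      x ∉ Finset.Ico (max (-k) (1 - c)) (min k (c - 1) + 1) → max 0 (c - |x|) = 0 := by
    intro c x hx hnx
    simp only [Finset.mem_Ico] at hx hnx
    rcases abs_cases x with ⟨e, _⟩ | ⟨e, _⟩ <;> rw [e] <;> omega
  have hsub : ∀ c : ℤ, Finset.Ico (max (-k) (1 - c)) (min k (c - 1) + 1) ⊆ Finset.Ico (-k) (k+1) := by
    intro c x hx; simp only [Finset.mem_Ico] at hx ⊢; omega
  have hpos : ∀ c x : ℤ, x ∈ Finset.Ico (max (-k) (1 - c)) (min k (c - 1) + 1) →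
      c - |x| = max 0 (c - |x|) := by
    intro c x hx
    simp only [Finset.mem_Ico] at hx
    rcases abs_cases x with ⟨e, _⟩ | ⟨e, _⟩ <;> rw [e] <;> omega
  -- first replace the unclamped weights inside the clamped sums
  have e1 : ∀ di ∈ Finset.Ico (max (-k) (1 - h)) (min k (h - 1) + 1),
      ∀ dj ∈ Finset.Ico (max (-k) (1 - w)) (min k (w - 1) + 1),
      (if di = 0 ∧ dj = 0 then (0:ℤ) else (h - |di|) * (w - |dj|))
        = (if di = 0 ∧ dj = 0 then (0:ℤ) else max 0 (h - |di|) * max 0 (w - |dj|)) := by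
    intro di hdi dj hdj
    rw [← hpos h di hdi, ← hpos w dj hdj]
  rw [Finset.sum_congr rfl fun di hdi => Finset.sum_congr rfl fun dj hdj => e1 di hdi dj hdj]
  -- then enlarge both index sets: the extra terms vanish
  have e2 : ∀ di ∈ Finset.Ico (max (-k) (1 - h)) (min k (h - 1) + 1),
      (∑ dj ∈ Finset.Ico (max (-k) (1 - w)) (min k (w - 1) + 1),
        (if di = 0 ∧ dj = 0 then (0:ℤ) else max 0 (h - |di|) * max 0 (w - |dj|)))
      = ∑ dj ∈ Finset.Ico (-k) (k + 1),
        (if di = 0 ∧ dj = 0 then (0:ℤ) else max 0 (h - |di|) * max 0 (w - |dj|)) := by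
    intro di _
    refine Finset.sum_subset (hsub w) ?_
    intro dj hdj hndj
    rw [hzero w dj hdj hndj]
    split_ifs <;> ring
  rw [Finset.sum_congr rfl e2]
  refine Finset.sum_subset (hsub h) ?_
  intro di hdi hndi
  refine Finset.sum_eq_zero fun dj _ => ?_
  rw [hzero h di hdi hndi]
  split_ifs <;> ring

theorem PI_eq (h k : ℤ) :
    (∑ i ∈ Finset.Ico (0:ℤ) h, ∑ ni ∈ Finset.Ico (i - k) (i + k + 1),
        if 0 ≤ ni ∧ ni < h then (1:ℤ) else 0)
      = ∑ d ∈ Finset.Ico (-k) (k + 1), max 0 (h - |d|) := by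
  have h1 : ∀ i ∈ Finset.Ico (0:ℤ) h,
      (∑ ni ∈ Finset.Ico (i - k) (i + k + 1), if 0 ≤ ni ∧ ni < h then (1:ℤ) else 0)
        = ∑ d ∈ Finset.Ico (-k) (k + 1), if 0 ≤ i + d ∧ i + d < h then (1:ℤ) else 0 := by
    intro i _
    have e1 : i - k = i + -k := by ring
    have e2 : i + k + 1 = i + (k + 1) := by ring
    rw [e1, e2, sum_Ico_shift]
  rw [Finset.sum_congr rfl h1, Finset.sum_comm]
  exact Finset.sum_congr rfl fun d _ => cnt_lemma h d

theorem Q_eq (h k : ℤ) (hk : 0 ≤ k) :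
    (∑ i ∈ Finset.Ico (0:ℤ) h, ∑ ni ∈ Finset.Ico (i - k) (i + k + 1),
        if ni = i then (1:ℤ) else 0) = max 0 h := by
  have h1 : ∀ i ∈ Finset.Ico (0:ℤ) h,
      (∑ ni ∈ Finset.Ico (i - k) (i + k + 1), if ni = i then (1:ℤ) else 0) = 1 := by
    intro i _
    rw [Finset.sum_ite_eq', if_pos (by simp only [Finset.mem_Ico]; omega)]
  rw [Finset.sum_congr rfl h1, Finset.sum_const, Int.card_Ico, nsmul_eq_mul, mul_one]
  omega

theorem Bcorr (h w k : ℤ) (hk : 0 ≤ k) :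
    (∑ di ∈ Finset.Ico (-k) (k + 1), ∑ dj ∈ Finset.Ico (-k) (k + 1),
        if di = 0 ∧ dj = 0 then max 0 (h - |di|) * max 0 (w - |dj|) else (0:ℤ))
      = max 0 h * max 0 w := by
  have h1 : ∀ di ∈ Finset.Ico (-k) (k + 1),
      (∑ dj ∈ Finset.Ico (-k) (k + 1),
          if di = 0 ∧ dj = 0 then max 0 (h - |di|) * max 0 (w - |dj|) else (0:ℤ))
        = if di = 0 then max 0 h * max 0 w else 0 := by
    intro di _
    have h2 : ∀ dj ∈ Finset.Ico (-k) (k + 1),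
        (if di = 0 ∧ dj = 0 then max 0 (h - |di|) * max 0 (w - |dj|) else (0:ℤ))
          = if dj = 0 then (if di = 0 then max 0 h * max 0 w else 0) else 0 := by
      intro dj _
      split_ifs with ha hb hc <;> simp_all
    rw [Finset.sum_congr rfl h2, Finset.sum_ite_eq', if_pos (by simp only [Finset.mem_Ico]; omega)]
  rw [Finset.sum_congr rfl h1, Finset.sum_ite_eq', if_pos (by simp only [Finset.mem_Ico]; omega)]

theorem AB_eq (h w nsize : ℤ) :
    get_number_of_all_neigbhours_surrounding h w nsize
      = get_number_of_all_neigbhours_surrounding_alt h w nsize := by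
  rw [A_eq, B_eq]
  rw [B_unclamp h w (PySem.Int.truncdiv nsize 2)]
  set k := PySem.Int.truncdiv nsize 2 with hkdef
  rcases (by omega : k < 0 ∨ 0 ≤ k) with hk0 | hk0
  · -- degenerate: every neighbourhood range is empty on both sides
    have hK : Finset.Ico (-k) (k + 1) = (∅ : Finset ℤ) := Finset.Ico_eq_empty (by omega)
    rw [hK]
    simp only [Finset.sum_empty]
    refine Finset.sum_eq_zero fun i _ => Finset.sum_eq_zero fun j _ => ?_
    have hE : Finset.Ico (i - k) (i + k + 1) = (∅ : Finset ℤ) := Finset.Ico_eq_empty (by omega)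
    rw [hE]
    simp
  · have stepA :
        (∑ i ∈ Finset.Ico (0:ℤ) h, ∑ j ∈ Finset.Ico (0:ℤ) w,
          ∑ ni ∈ Finset.Ico (i - k) (i + k + 1), ∑ nj ∈ Finset.Ico (j - k) (j + k + 1),
          (if ni < 0 ∨ ni ≥ h ∨ nj < 0 ∨ nj ≥ w ∨ (ni = i ∧ nj = j) then (0:ℤ) else 1))
        = (∑ d ∈ Finset.Ico (-k) (k + 1), max 0 (h - |d|))
            * (∑ d ∈ Finset.Ico (-k) (k + 1), max 0 (w - |d|))
          - max 0 h * max 0 w := by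
      have e1 : ∀ i ∈ Finset.Ico (0:ℤ) h, ∀ j ∈ Finset.Ico (0:ℤ) w,
          ∀ ni ∈ Finset.Ico (i - k) (i + k + 1), ∀ nj ∈ Finset.Ico (j - k) (j + k + 1),
          (if ni < 0 ∨ ni ≥ h ∨ nj < 0 ∨ nj ≥ w ∨ (ni = i ∧ nj = j) then (0:ℤ) else 1)
            = (if 0 ≤ ni ∧ ni < h then (1:ℤ) else 0) * (if 0 ≤ nj ∧ nj < w then (1:ℤ) else 0)
              - (if ni = i then (1:ℤ) else 0) * (if nj = j then (1:ℤ) else 0) := by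
        intro i hi j hj ni _ nj _
        simp only [Finset.mem_Ico] at hi hj
        split_ifs <;> omega
      rw [Finset.sum_congr rfl fun i hi => Finset.sum_congr rfl fun j hj =>
            Finset.sum_congr rfl fun ni hni => Finset.sum_congr rfl fun nj hnj =>
              e1 i hi j hj ni hni nj hnj]
      simp only [Finset.sum_sub_distrib]
      rw [sum4_factor (Finset.Ico 0 h) (Finset.Ico 0 w)
            (fun i => Finset.Ico (i - k) (i + k + 1)) (fun j => Finset.Ico (j - k) (j + k + 1))
            (fun _ ni => if 0 ≤ ni ∧ ni < h then (1:ℤ) else 0)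
            (fun _ nj => if 0 ≤ nj ∧ nj < w then (1:ℤ) else 0),
          sum4_factor (Finset.Ico 0 h) (Finset.Ico 0 w)
            (fun i => Finset.Ico (i - k) (i + k + 1)) (fun j => Finset.Ico (j - k) (j + k + 1))
            (fun i ni => if ni = i then (1:ℤ) else 0)
            (fun j nj => if nj = j then (1:ℤ) else 0),
          PI_eq h k, PI_eq w k, Q_eq h k hk0, Q_eq w k hk0]
    have stepB :
        (∑ di ∈ Finset.Ico (-k) (k + 1), ∑ dj ∈ Finset.Ico (-k) (k + 1),
          (if di = 0 ∧ dj = 0 then (0:ℤ) else max 0 (h - |di|) * max 0 (w - |dj|)))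
        = (∑ d ∈ Finset.Ico (-k) (k + 1), max 0 (h - |d|))
            * (∑ d ∈ Finset.Ico (-k) (k + 1), max 0 (w - |d|))
          - max 0 h * max 0 w := by
      have e2 : ∀ di ∈ Finset.Ico (-k) (k + 1), ∀ dj ∈ Finset.Ico (-k) (k + 1),
          (if di = 0 ∧ dj = 0 then (0:ℤ) else max 0 (h - |di|) * max 0 (w - |dj|))
            = max 0 (h - |di|) * max 0 (w - |dj|)
              - (if di = 0 ∧ dj = 0 then max 0 (h - |di|) * max 0 (w - |dj|) else 0) := by
        intro di _ dj _
        split_ifs <;> ring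
      rw [Finset.sum_congr rfl fun di hdi => Finset.sum_congr rfl fun dj hdj =>
            e2 di hdi dj hdj]
      simp only [Finset.sum_sub_distrib]
      rw [← Finset.sum_mul_sum, Bcorr h w k hk0]
    rw [stepA, stepB]

-- ===== VERDICT (by name: the statement is the Claim_ definition above) =====
theorem get_number_of_all_neigbhours_surrounding_spec : Claim_equal_get_number_of_all_neigbhours_surrounding := by
  intro h_ w nsize _
  unfold Spec_get_number_of_all_neigbhours_surrounding
  exact AB_eq h_ w nsize
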